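-- pv_equiv track=rewrite | github.com/sivaniraut/pythoncode | vvvv.py | insert_item
-- ===== SOURCE A (Python) =====
-- def insert_item(input_list:list, item: any, index: int=0):
--     """
--     @summary: insert item at given index
--     :param input_list:
--     :param item:
--     :param index:
--     :return:
--     """
--     # validation
--     if not isinstance(input_list, list):
--         raise TypeError("invlaid input")
--     if not isinstance(index, int):
--         raise TypeError("Invlaid index")
--     start_index = 0
--     len_list = len(input_list)
--     while start_index < len_list:
--         if start_index == index:
--             input_list = input_list[0:index] + [item] + input_list[index:]
--             break
--         start_index = start_index + 1
--     else:
--         input_list = input_list + [item]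
--     return  input_list
-- ===== SOURCE B (Python) =====
-- def insert_item(input_list: list, item: any, index: int = 0):
--     """Insert item before position index if 0 <= index < len, else append.
--
--     Single forward pass building a fresh result list (no slicing of halves).
--     """
--     if not isinstance(input_list, list):
--         raise TypeError("invlaid input")
--     if not isinstance(index, int):
--         raise TypeError("Invlaid index")
--     result = []
--     inserted = False
--     for i, x in enumerate(input_list):
--         if i == index:
--             result.append(item)
--             inserted = True
--         result.append(x)
--     if not inserted:
--         result.append(item)
--     return result
-- ===== Notes on version B (the rewrite author's own statement) =====
-- stated objective: alternative
-- what changed: Replaces A's counting while-loop that rebuilds the list from two slices (and mutates/rebinds via slicing) with a single enumerate pass that builds a fresh result list, appending the item when the running position equals index and falling back to a final append when no position matched.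
import Mathlib
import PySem

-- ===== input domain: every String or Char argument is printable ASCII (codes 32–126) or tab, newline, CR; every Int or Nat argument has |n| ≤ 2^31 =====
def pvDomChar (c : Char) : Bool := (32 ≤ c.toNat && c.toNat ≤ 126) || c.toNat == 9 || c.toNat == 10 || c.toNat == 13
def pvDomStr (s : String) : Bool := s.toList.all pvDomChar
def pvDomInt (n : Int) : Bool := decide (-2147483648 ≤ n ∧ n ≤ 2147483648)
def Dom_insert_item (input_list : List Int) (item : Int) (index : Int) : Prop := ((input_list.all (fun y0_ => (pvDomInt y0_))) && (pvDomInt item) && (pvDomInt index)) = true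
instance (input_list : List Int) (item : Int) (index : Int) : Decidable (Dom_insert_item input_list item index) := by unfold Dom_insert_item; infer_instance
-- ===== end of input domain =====

-- B replaces A's counting while-loop over two slices by a single enumerate pass
-- building a fresh result list with an inserted flag (objective: alternative).

-- ===== PORT A =====
-- the 'while start_index < len_list: …' loop; fuel is len - start_index
def insertItemWhile (input_list : List Int) (item : Int) (index : Int)
    (len_list : Nat) (start_index : Nat) : List Int :=
  if h : start_index < len_list then
    if (start_index : Int) = index then
      PySem.List.slice input_list (some 0) (some index) ++ [item] ++
        PySem.List.slice input_list (some index) none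
    else insertItemWhile input_list item index len_list (start_index + 1)
  else
    input_list ++ [item]
termination_by len_list - start_index

def insert_item (input_list : List Int) (item : Int) (index : Int) : List Int :=
  insertItemWhile input_list item index input_list.length 0

-- ===== PORT B =====
def insert_item_alt (input_list : List Int) (item : Int) (index : Int) : List Int :=
  let p :=
    (PySem.List.enumerate input_list 0).foldl
      (fun (st : List Int × Bool) ix =>
        if ix.1 = index then (st.1 ++ [item, ix.2], true) else (st.1 ++ [ix.2], st.2))
      ([], false)
  if p.2 = false then p.1 ++ [item] else p.1

-- ===== PRECONDITION & SPEC =====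
def Spec_insert_item (input_list : List Int) (item : Int) (index : Int) (out : List Int) : Prop := out = insert_item_alt input_list item index
instance (input_list : List Int) (item : Int) (index : Int) (out : List Int) : Decidable (Spec_insert_item input_list item index out) := by unfold Spec_insert_item; infer_instance

-- ===== CLAIM (what is proved, stated in full; the proofs are below) =====
def Claim_equal_insert_item : Prop := ∀ (input_list : List Int) (item : Int) (index : Int), Dom_insert_item input_list item index → Spec_insert_item input_list item index (insert_item input_list item index)

-- ===== LEMMAS AND PROOFS =====

theorem insertItemWhile_eq (l : List Int) (item index : Int) (s : Nat) :
    insertItemWhile l item index l.length s =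
      if (s : Int) ≤ index ∧ index < (l.length : Int) then
        PySem.List.slice l (some 0) (some index) ++ [item] ++
          PySem.List.slice l (some index) none
      else l ++ [item] := by
  induction' hfuel : l.length - s using Nat.strong_induction_on with fuel ih generalizing s
  unfold insertItemWhile
  by_cases h : s < l.length
  · simp only [dif_pos h]
    by_cases he : (s : Int) = index
    · simp [he]
      omega
    · rw [if_neg he, ih (l.length - (s+1)) (by omega) (s+1) rfl]
      have hiff : ((s+1 : Nat) : Int) ≤ index ∧ index < (l.length : Int) ↔
          (s : Int) ≤ index ∧ index < (l.length : Int) := by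
        constructor <;> intro hc <;> constructor <;> omega
      rw [if_congr hiff rfl rfl]
  · simp only [dif_neg h]
    rw [if_neg (by omega)]

theorem bFold_eq (item index : Int) (l : List Int) : ∀ (k : Int) (acc : List Int) (ins : Bool),
    (PySem.List.enumerate l k).foldl
      (fun (st : List Int × Bool) ix =>
        if ix.1 = index then (st.1 ++ [item, ix.2], true) else (st.1 ++ [ix.2], st.2))
      (acc, ins) =
    ( acc ++ (if k ≤ index ∧ index < k + l.length then
                l.take (index - k).toNat ++ item :: l.drop (index - k).toNat
              else l),
      ins || decide (k ≤ index ∧ index < k + l.length) ) := by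
  induction l with
  | nil =>
    intro k acc ins
    simp only [PySem.List.enumerate_nil, List.foldl_nil, List.length_nil, Nat.cast_zero,
      add_zero]
    rw [if_neg (by omega), decide_eq_false (by omega)]
    simp
  | cons x xs ih =>
    intro k acc ins
    rw [PySem.List.enumerate_cons, List.foldl_cons]
    by_cases he : k = index
    · simp only [if_pos he, ih]
      subst he
      rw [if_neg (by omega), if_pos (by refine ⟨le_refl _, ?_⟩; simp only [List.length_cons]; push_cast; omega)]
      rw [decide_eq_false (by omega)]
      simp
    · simp only [if_neg he, ih]
      have hiff : (k + 1 ≤ index ∧ index < k + 1 + (xs.length : Int)) ↔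
          (k ≤ index ∧ index < k + ((x :: xs).length : Int)) := by
        simp only [List.length_cons]
        constructor <;> intro hc <;> constructor <;> [omega; omega; omega; omega]
      by_cases hc : k + 1 ≤ index ∧ index < k + 1 + (xs.length : Int)
      · rw [if_pos hc, if_pos (hiff.mp hc)]
        have hn : (index - k).toNat = (index - (k + 1)).toNat + 1 := by omega
        rw [decide_eq_true hc, decide_eq_true (hiff.mp hc)]
        simp [hn]
      · rw [if_neg hc, if_neg (fun h => hc (hiff.mpr h))]
        rw [decide_eq_false hc, decide_eq_false (fun h => hc (hiff.mpr h))]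
        simp

-- ===== VERDICT (by name: the statement is the Claim_ definition above) =====
theorem insert_item_spec : Claim_equal_insert_item := by
  intro l item index _
  show insert_item l item index = insert_item_alt l item index
  rw [insert_item, insertItemWhile_eq]
  rw [insert_item_alt]
  simp only [bFold_eq]
  by_cases hc : (0 : Int) ≤ index ∧ index < (l.length : Int)
  · have hc' : ((0 : Nat) : Int) ≤ index ∧ index < (l.length : Int) := by exact_mod_cast hc
    have hc0 : (0 : Int) ≤ index ∧ index < 0 + (l.length : Int) := by
      exact ⟨hc.1, by omega⟩
    rw [if_pos hc', if_pos hc0, decide_eq_true hc0]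
    simp only [Bool.or_true]
    rw [if_neg (by simp)]
    rw [PySem.List.slice_zero_start, PySem.List.slice_to _ hc.1, PySem.List.slice_from _ hc.1]
    simp
  · have h0' : ¬ (((0 : Nat) : Int) ≤ index ∧ index < (l.length : Int)) := by
      intro h; exact hc (by exact_mod_cast h)
    have hc0 : ¬ ((0 : Int) ≤ index ∧ index < 0 + (l.length : Int)) := by
      intro h; exact hc ⟨h.1, by omega⟩
    rw [if_neg h0', if_neg hc0, decide_eq_false hc0]
    simp
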